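-- pv_equiv track=rewrite | github.com/joshua-phishfirewall/auto-ad | modules/ldap_enum.py | _parse_naming_contexts
-- ===== SOURCE A (Python) =====
-- from typing import List, Dict, Any, Optional, Tuple
--
-- def _parse_naming_contexts(output: str) -> List[str]:
--     """Parse naming contexts from LDAP output."""
--     contexts = []
--
--     for line in output.split('\n'):
--         line = line.strip()
--         if line.startswith('namingContexts:'):
--             context = line.split(':', 1)[1].strip()
--             contexts.append(context)
--
--     return contexts
-- ===== SOURCE B (Python) =====
-- import re
-- from typing import List
--
-- _NCTX_RE = re.compile(r'^[ \t\r]*namingContexts:(.*)$', re.MULTILINE)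
--
-- def _parse_naming_contexts(output: str) -> List[str]:
--     """Parse naming contexts from LDAP output (single multiline-regex scan)."""
--     return [m.strip() for m in _NCTX_RE.findall(output)]
-- ===== Notes on version B (the rewrite author's own statement) =====
-- stated objective: idiomatic
-- what changed: A's explicit per-line loop (strip each line, test the prefix, split on the first colon) is replaced by a single compiled multiline-regex scan over the whole output whose captures are stripped in one comprehension.
import Mathlib
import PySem

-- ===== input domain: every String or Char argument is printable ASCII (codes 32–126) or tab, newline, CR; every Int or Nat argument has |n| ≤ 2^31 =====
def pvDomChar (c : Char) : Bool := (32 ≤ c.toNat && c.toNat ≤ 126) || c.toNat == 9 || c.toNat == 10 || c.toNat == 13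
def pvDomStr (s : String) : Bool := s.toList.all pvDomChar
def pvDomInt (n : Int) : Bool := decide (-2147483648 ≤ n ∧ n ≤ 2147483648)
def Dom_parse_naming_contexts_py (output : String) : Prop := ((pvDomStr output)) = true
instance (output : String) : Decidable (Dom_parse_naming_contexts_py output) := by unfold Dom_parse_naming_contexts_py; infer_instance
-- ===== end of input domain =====

-- B replaces A's per-line strip/startswith/split loop by a single multiline-regex scan (more idiomatic; no speed claim).

-- ===== PORT A =====
def parse_naming_contexts_py (output : String) : List String :=
  ((PySem.Chars.splitOn output.toList ['\n']).foldl (fun contexts line =>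
      let line := PySem.Chars.strip line
      if PySem.Chars.startswith line "namingContexts:".toList then
        -- line.split(':', 1)[1]: index 1 always exists here, since the startswith guard guarantees a ':' in line
        let context := PySem.Chars.strip
          ((PySem.List.pyGet? (PySem.Chars.splitOnMax line [':'] 1) (1 : Int)).getD [])
        contexts ++ [context]
      else contexts)
    []).map String.ofList

-- ===== PORT B =====
-- Hand port (exact) of the compiled regex ^[ \t\r]*namingContexts:(.*)$ with re.MULTILINE, as findall applies it:
-- the ^ anchor restricts candidate matches to '\n'-line starts, so findall examines each '\n'-separated
-- segment once; the greedy class [ \t\r]* is exact maximal munch ('n' is not in the class, so no backtracking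
-- position other than the maximal one can succeed), then the literal 'namingContexts:', and the capture (.*)
-- is the rest of the segment ('.' never matches '\n'). One capture per matching line, in text order.
def pvMatchNamingContext (line : List Char) : Option (List Char) :=
  let t := line.dropWhile (fun c => c == ' ' || c == '\t' || c == '\r')
  if "namingContexts:".toList.isPrefixOf t then some (t.drop "namingContexts:".toList.length) else none

def parse_naming_contexts_py_alt (output : String) : List String :=
  (((PySem.Chars.splitOn output.toList ['\n']).filterMap pvMatchNamingContext).map
    (fun m => PySem.Chars.strip m)).map String.ofList

-- ===== PRECONDITION & SPEC =====
def Spec_parse_naming_contexts_py (output : String) (out : List String) : Prop := out = parse_naming_contexts_py_alt output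
instance (output : String) (out : List String) : Decidable (Spec_parse_naming_contexts_py output out) := by unfold Spec_parse_naming_contexts_py; infer_instance

-- ===== CLAIM (what is proved, stated in full; the proofs are below) =====
def Claim_equal_parse_naming_contexts_py : Prop := ∀ (output : String), Dom_parse_naming_contexts_py output → Spec_parse_naming_contexts_py output (parse_naming_contexts_py output)

-- ===== LEMMAS AND PROOFS =====

-- reference model of str.split('\n') used only by the proofs
def mySplit (pre : List Char) : List Char → List (List Char)
  | [] => [pre]
  | c :: rest => if c = '\n' then pre :: mySplit [] rest else mySplit (pre ++ [c]) rest

lemma go_eq_mySplit (fuel : Nat) (l cur : List Char) (acc : List (List Char)) (h : l.length ≤ fuel) :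
    PySem.Chars.splitOn.go ['\n'] fuel l cur acc = acc.reverse ++ mySplit cur.reverse l := by
  induction fuel generalizing l cur acc with
  | zero =>
    have : l = [] := by simpa using Nat.le_zero.mp h
    subst this
    simp [PySem.Chars.splitOn.go, mySplit]
  | succ f ih =>
    cases l with
    | nil => simp [PySem.Chars.splitOn.go, mySplit]
    | cons c rest =>
      rw [PySem.Chars.splitOn.go]
      by_cases hc : c = '\n'
      · subst hc
        simp only [List.isPrefixOf, Bool.and_true, beq_self_eq_true, if_pos]
        rw [ih _ _ _ (by simpa using Nat.le_of_succ_le_succ h)]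
        simp [mySplit]
      · have : (['\n'].isPrefixOf (c :: rest)) = false := by
          simp [List.isPrefixOf]; exact fun h' => absurd h'.symm hc
        rw [this]
        simp only [Bool.false_eq_true, if_false]
        rw [ih _ _ _ (by simpa using Nat.le_of_succ_le_succ h)]
        simp [mySplit, hc]

lemma splitOn_eq_mySplit (s : List Char) :
    PySem.Chars.splitOn s ['\n'] = mySplit [] s := by
  unfold PySem.Chars.splitOn
  rw [go_eq_mySplit _ _ _ _ (by omega)]
  simp

lemma mySplit_ok (l : List Char) (pre : List Char)
    (hp : ∀ c ∈ pre, pvDomChar c = true ∧ c ≠ '\n') (hl : ∀ c ∈ l, pvDomChar c = true) :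
    ∀ seg ∈ mySplit pre l, ∀ c ∈ seg, pvDomChar c = true ∧ c ≠ '\n' := by
  induction l generalizing pre with
  | nil => simpa [mySplit] using hp
  | cons x rest ih =>
    by_cases hc : x = '\n'
    · subst hc
      simp only [mySplit, if_pos]
      intro seg hseg
      rcases List.mem_cons.mp hseg with h1 | h2
      · exact fun d hd => hp d (h1 ▸ hd)
      · exact ih [] (by simp) (fun d hd => hl d (List.mem_cons_of_mem _ hd)) seg h2
    · simp only [mySplit, if_neg hc]
      refine ih (pre ++ [x]) ?_ (fun d hd => hl d (List.mem_cons_of_mem _ hd))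
      intro d hd
      rcases List.mem_append.mp hd with h1 | h2
      · exact hp d h1
      · simp at h2; subst h2; exact ⟨hl _ List.mem_cons_self, hc⟩

lemma goMax_zero (fuel : Nat) (l cur : List Char) (acc : List (List Char)) :
    PySem.Chars.splitOnMax.go [':'] fuel 0 l cur acc = acc.reverse ++ [cur.reverse ++ l] := by
  cases fuel with
  | zero => simp [PySem.Chars.splitOnMax.go]
  | succ f =>
    cases l with
    | nil => simp [PySem.Chars.splitOnMax.go]
    | cons c rest => rw [PySem.Chars.splitOnMax.go]; simp

lemma goMax_one (a : List Char) (ha : ':' ∉ a) :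
    ∀ (fuel : Nat) (b cur : List Char) (acc : List (List Char)),
      a.length + b.length < fuel →
      PySem.Chars.splitOnMax.go [':'] fuel 1 (a ++ ':' :: b) cur acc
        = acc.reverse ++ [cur.reverse ++ a, b] := by
  induction a with
  | nil =>
    intro fuel b cur acc h
    cases fuel with
    | zero => omega
    | succ f =>
      rw [PySem.Chars.splitOnMax.go.eq_def]
      simp only [List.nil_append, List.isPrefixOf, Bool.and_true, beq_self_eq_true, if_pos]
      rw [goMax_zero]
      simp
  | cons x a' ih =>
    intro fuel b cur acc h
    have hx : x ≠ ':' := fun hh => ha (hh ▸ List.mem_cons_self)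
    cases fuel with
    | zero => omega
    | succ f =>
      rw [PySem.Chars.splitOnMax.go.eq_def]
      have hpre : ([':'].isPrefixOf (x :: (a' ++ ':' :: b))) = false := by
        simp [List.isPrefixOf]; exact fun h' => absurd h'.symm hx
      simp only [List.cons_append, hpre, Bool.false_eq_true, if_false, Nat.succ_ne_zero]
      rw [ih (fun hm => ha (List.mem_cons_of_mem _ hm)) f b (x :: cur) acc (by simp at h ⊢; omega)]
      simp

lemma splitOnMax_nctx (v : List Char) :
    PySem.Chars.splitOnMax ("namingContexts".toList ++ ':' :: v) [':'] 1
      = ["namingContexts".toList, v] := by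
  unfold PySem.Chars.splitOnMax
  rw [if_neg (by omega)]
  rw [show (1 : Int).toNat = 1 from rfl]
  rw [goMax_one _ (by decide) _ _ _ _ (by simp; omega)]
  simp

lemma char_eq_iff_toNat (a b : Char) : (a == b) = decide (a.toNat = b.toNat) := by
  by_cases h : a = b
  · subst h; simp
  · have hn : a.toNat ≠ b.toNat := fun hh => h (Char.ext (UInt32.toNat_inj.mp hh))
    simp [h, hn]

lemma isspace_eq_cls {c : Char} (hd : pvDomChar c = true) (hn : c ≠ '\n') :
    PySem.Chars.isspace c = (c == ' ' || c == '\t' || c == '\r') := by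
  have hv : c.toNat ≠ 10 := fun h => hn (Char.ext (UInt32.toNat_inj.mp h))
  simp only [pvDomChar, Bool.or_eq_true, Bool.and_eq_true, decide_eq_true_eq, beq_iff_eq] at hd
  simp only [PySem.Chars.isspace, char_eq_iff_toNat]
  rw [Bool.eq_iff_iff]
  simp only [Bool.or_eq_true, Bool.and_eq_true, decide_eq_true_eq]
  show _ ↔ (c.toNat = ' '.toNat ∨ c.toNat = '\t'.toNat) ∨ c.toNat = '\r'.toNat
  simp only [show ' '.toNat = 32 from rfl, show '\t'.toNat = 9 from rfl, show '\r'.toNat = 13 from rfl]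
  omega

lemma rstrip_decomp (x : List Char) :
    ∃ w, x = PySem.Chars.rstrip x ++ w ∧ ∀ c ∈ w, PySem.Chars.isspace c = true := by
  refine ⟨(x.reverse.takeWhile PySem.Chars.isspace).reverse, ?_, ?_⟩
  · conv_lhs => rw [← List.reverse_reverse x,
      ← List.takeWhile_append_dropWhile (p := PySem.Chars.isspace) (l := x.reverse)]
    rw [List.reverse_append]
    rfl
  · intro c hc
    rw [List.mem_reverse] at hc
    exact List.mem_takeWhile_imp hc

lemma rstrip_append_sp (a w : List Char) (hw : ∀ c ∈ w, PySem.Chars.isspace c = true) :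
    PySem.Chars.rstrip (a ++ w) = PySem.Chars.rstrip a := by
  unfold PySem.Chars.rstrip
  rw [List.reverse_append, List.dropWhile_append]
  have : w.reverse.dropWhile PySem.Chars.isspace = [] := by
    rw [List.dropWhile_eq_nil_iff]
    exact fun c hc => hw c (List.mem_reverse.mp hc)
  simp [this]

lemma strip_append_sp (a w : List Char) (hw : ∀ c ∈ w, PySem.Chars.isspace c = true) :
    PySem.Chars.strip (a ++ w) = PySem.Chars.strip a := by
  unfold PySem.Chars.strip PySem.Chars.lstrip
  rw [List.dropWhile_append]
  by_cases he : (a.dropWhile PySem.Chars.isspace).isEmpty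
  · rw [if_pos he]
    have hw' : w.dropWhile PySem.Chars.isspace = [] := by
      rw [List.dropWhile_eq_nil_iff]; exact hw
    rw [hw', List.isEmpty_iff.mp he]
  · rw [if_neg he]
    exact rstrip_append_sp _ _ hw

lemma rstrip_nctx (u : List Char) :
    PySem.Chars.rstrip ("namingContexts:".toList ++ u)
      = "namingContexts:".toList ++ PySem.Chars.rstrip u := by
  unfold PySem.Chars.rstrip
  rw [List.reverse_append, List.dropWhile_append]
  by_cases he : (u.reverse.dropWhile PySem.Chars.isspace).isEmpty
  · rw [if_pos he]
    rw [List.isEmpty_iff.mp he]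
    rw [show (List.dropWhile PySem.Chars.isspace "namingContexts:".toList.reverse)
          = "namingContexts:".toList.reverse from by decide]
    simp
  · rw [if_neg he]
    simp

lemma dropWhile_congr {α : Type} {p q : α → Bool} (l : List α) (h : ∀ x ∈ l, p x = q x) :
    l.dropWhile p = l.dropWhile q := by
  induction l with
  | nil => rfl
  | cons x xs ih =>
    simp only [List.dropWhile_cons]
    rw [h x List.mem_cons_self]
    split
    · exact ih (fun y hy => h y (List.mem_cons_of_mem _ hy))
    · rfl

lemma strip_eq_rstrip_dropWhile (line : List Char)
    (hok : ∀ c ∈ line, pvDomChar c = true ∧ c ≠ '\n') :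
    PySem.Chars.strip line
      = PySem.Chars.rstrip (line.dropWhile (fun c => c == ' ' || c == '\t' || c == '\r')) := by
  unfold PySem.Chars.strip PySem.Chars.lstrip
  rw [dropWhile_congr line (fun x hx => isspace_eq_cls (hok x hx).1 (hok x hx).2)]

lemma step_eq (line : List Char) (hok : ∀ c ∈ line, pvDomChar c = true ∧ c ≠ '\n') :
    (if PySem.Chars.startswith (PySem.Chars.strip line) "namingContexts:".toList then
       [PySem.Chars.strip ((PySem.List.pyGet?
          (PySem.Chars.splitOnMax (PySem.Chars.strip line) [':'] 1) (1 : Int)).getD [])]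
     else [])
    = ((pvMatchNamingContext line).map (fun m => PySem.Chars.strip m)).toList := by
  have hstrip := strip_eq_rstrip_dropWhile line hok
  unfold pvMatchNamingContext
  by_cases hpre : "namingContexts:".toList.isPrefixOf
      (line.dropWhile (fun c => c == ' ' || c == '\t' || c == '\r'))
  · obtain ⟨u, hu⟩ := List.isPrefixOf_iff_prefix.mp hpre
    simp only [hpre, if_pos]
    rw [hstrip, ← hu, rstrip_nctx]
    have hsw : PySem.Chars.startswith
        ("namingContexts:".toList ++ PySem.Chars.rstrip u) "namingContexts:".toList = true := by
      unfold PySem.Chars.startswith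
      exact List.isPrefixOf_iff_prefix.mpr (List.prefix_append _ _)
    rw [if_pos hsw]
    have hsplitlit : ("namingContexts:".toList : List Char)
        = "namingContexts".toList ++ [':'] := by decide
    rw [show ("namingContexts:".toList ++ PySem.Chars.rstrip u : List Char)
          = "namingContexts".toList ++ ':' :: PySem.Chars.rstrip u from by
        rw [hsplitlit]; simp]
    rw [splitOnMax_nctx]
    have hget : (PySem.List.pyGet? (["namingContexts".toList, PySem.Chars.rstrip u]) (1 : Int)).getD []
        = PySem.Chars.rstrip u := by
      simp [PySem.List.pyGet?, PySem.List.pyIdx?]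
    rw [hget]
    have hdrop : ("namingContexts:".toList ++ u).drop "namingContexts:".toList.length = u := by
      simp
    rw [hdrop]
    obtain ⟨w, hw1, hw2⟩ := rstrip_decomp u
    have : PySem.Chars.strip u = PySem.Chars.strip (PySem.Chars.rstrip u) := by
      conv_lhs => rw [hw1]
      exact strip_append_sp _ _ hw2
    rw [Option.map_some, Option.toList_some, this]
  · simp only [hpre, Bool.false_eq_true]
    have hsw : PySem.Chars.startswith (PySem.Chars.strip line) "namingContexts:".toList = false := by
      rw [hstrip]
      cases hs : PySem.Chars.startswith
          (PySem.Chars.rstrip (line.dropWhile (fun c => c == ' ' || c == '\t' || c == '\r')))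
          "namingContexts:".toList with
      | false => rfl
      | true =>
        exfalso
        unfold PySem.Chars.startswith at hs
        obtain ⟨r, hr⟩ := List.isPrefixOf_iff_prefix.mp hs
        obtain ⟨w, hw1, _⟩ := rstrip_decomp
          (line.dropWhile (fun c => c == ' ' || c == '\t' || c == '\r'))
        apply hpre
        apply List.isPrefixOf_iff_prefix.mpr
        rw [hw1, ← hr]
        exact ⟨r ++ w, by simp⟩
    rw [hsw]
    simp

lemma fold_eq (lines : List (List Char))
    (h : ∀ l ∈ lines, ∀ c ∈ l, pvDomChar c = true ∧ c ≠ '\n') (acc : List (List Char)) :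
    lines.foldl (fun contexts line =>
      let line := PySem.Chars.strip line
      if PySem.Chars.startswith line "namingContexts:".toList then
        let context := PySem.Chars.strip
          ((PySem.List.pyGet? (PySem.Chars.splitOnMax line [':'] 1) (1 : Int)).getD [])
        contexts ++ [context]
      else contexts) acc
    = acc ++ (lines.filterMap pvMatchNamingContext).map (fun m => PySem.Chars.strip m) := by
  induction lines generalizing acc with
  | nil => simp
  | cons l ls ih =>
    rw [List.foldl_cons]
    have hstep := step_eq l (h l List.mem_cons_self)
    have hf : (if PySem.Chars.startswith (PySem.Chars.strip l) "namingContexts:".toList = true then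
          acc ++ [PySem.Chars.strip
            ((PySem.List.pyGet? (PySem.Chars.splitOnMax (PySem.Chars.strip l) [':'] 1) (1 : Int)).getD [])]
        else acc)
        = acc ++ ((pvMatchNamingContext l).map (fun m => PySem.Chars.strip m)).toList := by
      rw [← hstep]
      by_cases hg : PySem.Chars.startswith (PySem.Chars.strip l) "namingContexts:".toList = true
      · rw [if_pos hg, if_pos hg]
      · rw [if_neg hg, if_neg hg, List.append_nil]
    rw [show (List.foldl (fun contexts line =>
        let line := PySem.Chars.strip line
        if PySem.Chars.startswith line "namingContexts:".toList then
          let context := PySem.Chars.strip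
            ((PySem.List.pyGet? (PySem.Chars.splitOnMax line [':'] 1) (1 : Int)).getD [])
          contexts ++ [context]
        else contexts)
        (let line := PySem.Chars.strip l
         if PySem.Chars.startswith line "namingContexts:".toList then
           let context := PySem.Chars.strip
             ((PySem.List.pyGet? (PySem.Chars.splitOnMax line [':'] 1) (1 : Int)).getD [])
           acc ++ [context]
         else acc) ls)
      = (List.foldl (fun contexts line =>
        let line := PySem.Chars.strip line
        if PySem.Chars.startswith line "namingContexts:".toList then
          let context := PySem.Chars.strip
            ((PySem.List.pyGet? (PySem.Chars.splitOnMax line [':'] 1) (1 : Int)).getD [])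
          contexts ++ [context]
        else contexts)
        (if PySem.Chars.startswith (PySem.Chars.strip l) "namingContexts:".toList = true then
          acc ++ [PySem.Chars.strip
            ((PySem.List.pyGet? (PySem.Chars.splitOnMax (PySem.Chars.strip l) [':'] 1) (1 : Int)).getD [])]
        else acc) ls) from rfl]
    rw [hf, ih (fun l' hl' => h l' (List.mem_cons_of_mem _ hl'))]
    rw [List.filterMap_cons]
    cases hm : pvMatchNamingContext l with
    | none => simp
    | some v => simp

-- ===== VERDICT (by name: the statement is the Claim_ definition above) =====
theorem parse_naming_contexts_py_spec : Claim_equal_parse_naming_contexts_py := by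
  intro output hdom
  unfold Spec_parse_naming_contexts_py parse_naming_contexts_py parse_naming_contexts_py_alt
  have hok : ∀ l ∈ PySem.Chars.splitOn output.toList ['\n'],
      ∀ c ∈ l, pvDomChar c = true ∧ c ≠ '\n' := by
    rw [splitOn_eq_mySplit]
    exact mySplit_ok _ [] (by simp) (by
      have := hdom
      unfold Dom_parse_naming_contexts_py pvDomStr at this
      simpa [List.all_eq_true] using this)
  rw [fold_eq _ hok []]
  simp
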